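-- pv_equiv track=rewrite | github.com/stefana09/Satisfiabilitate-MPI | test.py | la_clauze_int
-- ===== SOURCE A (Python) =====
-- def la_clauze_int(clauze):
--     mapa, nr, rezultat = {}, 1, []
--     for clauza in clauze:
--         c_int = []
--         for lit in clauza:
--             neg = lit.startswith("~")
--             v = lit[1:] if neg else lit
--             if v not in mapa:
--                 mapa[v] = nr
--                 nr += 1
--             c_int.append(-mapa[v] if neg else mapa[v])
--         rezultat.append(c_int)
--     return rezultat, mapa
-- ===== SOURCE B (Python) =====
-- def la_clauze_int(clauze):
--     # Pass 1: assign numbers to variables in first-appearance order.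
--     mapa = {}
--     nr = 1
--     for clauza in clauze:
--         for lit in clauza:
--             v = lit[1:] if lit.startswith("~") else lit
--             if v not in mapa:
--                 mapa[v] = nr
--                 nr += 1
--     # Pass 2: encode every literal against the finished table.
--     rezultat = [[-mapa[lit[1:]] if lit.startswith("~") else mapa[lit]
--                  for lit in clauza] for clauza in clauze]
--     return rezultat, mapa
-- ===== Notes on version B (the rewrite author's own statement) =====
-- stated objective: alternative
-- what changed: B splits A's single interleaved loop into two passes: one that only builds the variable table in first-appearance order, and a nested list comprehension that encodes every literal against the finished table; correctness rests on the proved invariant that the final map agrees with each intermediate map on already-assigned variables.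
import Mathlib
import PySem

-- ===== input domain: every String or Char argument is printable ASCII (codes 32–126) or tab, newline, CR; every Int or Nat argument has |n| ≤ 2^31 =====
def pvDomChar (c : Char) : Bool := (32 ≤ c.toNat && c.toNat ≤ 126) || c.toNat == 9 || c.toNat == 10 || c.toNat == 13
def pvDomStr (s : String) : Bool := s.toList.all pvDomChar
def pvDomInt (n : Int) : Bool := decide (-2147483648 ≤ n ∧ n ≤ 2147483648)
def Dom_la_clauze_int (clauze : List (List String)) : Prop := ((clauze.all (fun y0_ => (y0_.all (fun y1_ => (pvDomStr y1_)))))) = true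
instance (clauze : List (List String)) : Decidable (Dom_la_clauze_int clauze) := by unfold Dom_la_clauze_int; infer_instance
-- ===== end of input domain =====

-- B re-decomposes A: one pass builds the variable table, a second pass encodes against it (same cost, different structure).

-- ===== PORT A =====
-- A's inner loop body: strip '~', number the variable if new, append the signed code.
def laStepLit (st2 : PySem.Dict String Int × Int × List Int) (lit : String) :
    PySem.Dict String Int × Int × List Int :=
  let neg := PySem.Str.startswith lit "~"
  let v := if neg then PySem.Str.slice lit (some 1) none else lit
  let p := if st2.1.contains v then (st2.1, st2.2.1) else (st2.1.insert v st2.2.1, st2.2.1 + 1)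
  (p.1, p.2, st2.2.2 ++ [if neg then -(p.1.getD v 0) else p.1.getD v 0])

-- A's outer loop body: encode one clause, append it to the result.
def laStepClauza (st : PySem.Dict String Int × Int × List (List Int)) (clauza : List String) :
    PySem.Dict String Int × Int × List (List Int) :=
  let s2 := clauza.foldl laStepLit (st.1, st.2.1, [])
  (s2.1, s2.2.1, st.2.2 ++ [s2.2.2])

def la_clauze_int (clauze : List (List String)) : List (List Int) × (List (String × Int)) :=
  let s := clauze.foldl laStepClauza ((PySem.Dict.empty : PySem.Dict String Int), (1 : Int), ([] : List (List Int)))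
  (s.2.2, s.1.items)

-- ===== PORT B =====
-- variable name of a literal (lit[1:] if it starts with '~')
def pvVar (lit : String) : String :=
  if PySem.Str.startswith lit "~" then PySem.Str.slice lit (some 1) none else lit

-- pass-1 step: number the variable if it is new
def pvBuild (st : PySem.Dict String Int × Int) (lit : String) : PySem.Dict String Int × Int :=
  if st.1.contains (pvVar lit) then st else (st.1.insert (pvVar lit) st.2, st.2 + 1)

-- pass-2 encoding of one literal against the finished table
def pvEncode (mapa : PySem.Dict String Int) (lit : String) : Int :=
  if PySem.Str.startswith lit "~" then -(mapa.getD (PySem.Str.slice lit (some 1) none) 0)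
  else mapa.getD lit 0

def la_clauze_int_alt (clauze : List (List String)) : List (List Int) × (List (String × Int)) :=
  let mapa := (clauze.foldl (fun st clauza => clauza.foldl pvBuild st)
      ((PySem.Dict.empty : PySem.Dict String Int), (1 : Int))).1
  (clauze.map (fun clauza => clauza.map (pvEncode mapa)), mapa.items)

-- ===== PRECONDITION & SPEC =====
def Spec_la_clauze_int (clauze : List (List String)) (out : List (List Int) × (List (String × Int))) : Prop := out = la_clauze_int_alt clauze
instance (clauze : List (List String)) (out : List (List Int) × (List (String × Int))) : Decidable (Spec_la_clauze_int clauze out) := by unfold Spec_la_clauze_int; infer_instance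

-- ===== CLAIM (what is proved, stated in full; the proofs are below) =====
def Claim_equal_la_clauze_int : Prop := ∀ (clauze : List (List String)), Dom_la_clauze_int clauze → Spec_la_clauze_int clauze (la_clauze_int clauze)

-- ===== LEMMAS AND PROOFS =====

-- M extends m: every key already assigned in m keeps its value in M
def DExt (m M : PySem.Dict String Int) : Prop :=
  ∀ v x, m.get? v = some x → M.get? v = some x

theorem dext_refl (m : PySem.Dict String Int) : DExt m m := fun _ _ h => h

theorem dext_trans {a b c : PySem.Dict String Int} (h1 : DExt a b) (h2 : DExt b c) : DExt a c :=
  fun v x h => h2 v x (h1 v x h)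

theorem dext_build (st : PySem.Dict String Int × Int) (lit : String) :
    DExt st.1 (pvBuild st lit).1 := by
  intro v x h
  unfold pvBuild
  split
  · exact h
  · rename_i hc
    rw [PySem.Dict.get?_insert]
    split
    · rename_i hv
      subst hv
      rw [(PySem.Dict.get?_eq_none_iff_contains _ _).mpr (by simpa using hc)] at h
      exact absurd h (by simp)
    · exact h

theorem dext_buildL (l : List String) (st : PySem.Dict String Int × Int) :
    DExt st.1 (l.foldl pvBuild st).1 := by
  induction l generalizing st with
  | nil => exact dext_refl _
  | cons lit l ih => exact dext_trans (dext_build st lit) (ih (pvBuild st lit))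

theorem dext_buildC (cls : List (List String)) (st : PySem.Dict String Int × Int) :
    DExt st.1 (cls.foldl (fun st cl => cl.foldl pvBuild st) st).1 := by
  induction cls generalizing st with
  | nil => exact dext_refl _
  | cons cl cls ih => exact dext_trans (dext_buildL cl st) (ih (cl.foldl pvBuild st))

theorem build_get?_isSome (st : PySem.Dict String Int × Int) (lit : String) :
    ∃ y, (pvBuild st lit).1.get? (pvVar lit) = some y := by
  unfold pvBuild
  split
  · rename_i hc
    rcases hget : st.1.get? (pvVar lit) with _ | y
    · rw [PySem.Dict.get?_eq_none_iff_contains] at hget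
      simp [hget] at hc
    · exact ⟨y, rfl⟩
  · exact ⟨st.2, PySem.Dict.get?_insert_self _ _ _⟩

-- One step of A's inner loop, written with B's helpers
theorem step_lit_eq (m : PySem.Dict String Int) (n : Int) (acc : List Int) (lit : String) :
    laStepLit (m, n, acc) lit =
      ((pvBuild (m, n) lit).1, (pvBuild (m, n) lit).2,
        acc ++ [pvEncode (pvBuild (m, n) lit).1 lit]) := by
  simp only [laStepLit, pvBuild, pvVar, pvEncode]
  split <;> split <;> simp_all

theorem encode_stable (st : PySem.Dict String Int × Int) (lit : String)
    {M : PySem.Dict String Int} (h : DExt (pvBuild st lit).1 M) :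
    pvEncode (pvBuild st lit).1 lit = pvEncode M lit := by
  obtain ⟨y, hy⟩ := build_get?_isSome st lit
  have hM := h _ _ hy
  unfold pvEncode
  by_cases hneg : PySem.Str.startswith lit "~" = true
  · rw [if_pos hneg, if_pos hneg]
    have hv : pvVar lit = PySem.Str.slice lit (some 1) none := by unfold pvVar; rw [if_pos hneg]
    rw [hv] at hy hM
    rw [PySem.Dict.getD_of_get?_eq_some _ _ hy, PySem.Dict.getD_of_get?_eq_some _ _ hM]
  · rw [if_neg hneg, if_neg hneg]
    have hv : pvVar lit = lit := by unfold pvVar; rw [if_neg hneg]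
    rw [hv] at hy hM
    rw [PySem.Dict.getD_of_get?_eq_some _ _ hy, PySem.Dict.getD_of_get?_eq_some _ _ hM]

-- A's inner loop = pass-1 fold on the map part, plus the final-map encodings appended
theorem inner_eq (l : List String) (m : PySem.Dict String Int) (n : Int) (acc : List Int)
    (M : PySem.Dict String Int) (hM : DExt (l.foldl pvBuild (m, n)).1 M) :
    l.foldl laStepLit (m, n, acc) =
      ((l.foldl pvBuild (m, n)).1, (l.foldl pvBuild (m, n)).2, acc ++ l.map (pvEncode M)) := by
  induction l generalizing m n acc with
  | nil => simp
  | cons lit l ih =>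
    rcases hp : pvBuild (m, n) lit with ⟨m1, n1⟩
    simp only [List.foldl_cons, hp] at hM ⊢
    have hext : DExt (pvBuild (m, n) lit).1 M := by
      rw [hp]; exact dext_trans (dext_buildL l (m1, n1)) hM
    have henc := encode_stable (m, n) lit hext
    have hstep := step_lit_eq m n acc lit
    rw [hp] at henc hstep
    rw [hstep, ih m1 n1 _ hM, henc]
    simp [List.map_cons]

-- A's outer loop = pass-1 fold on the map part, plus the clause encodings appended
theorem outer_eq (cls : List (List String)) (m : PySem.Dict String Int) (n : Int)
    (accR : List (List Int)) (M : PySem.Dict String Int)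
    (hM : DExt (cls.foldl (fun st cl => cl.foldl pvBuild st) (m, n)).1 M) :
    cls.foldl laStepClauza (m, n, accR) =
      ((cls.foldl (fun st cl => cl.foldl pvBuild st) (m, n)).1,
       (cls.foldl (fun st cl => cl.foldl pvBuild st) (m, n)).2,
       accR ++ cls.map (fun cl => cl.map (pvEncode M))) := by
  induction cls generalizing m n accR with
  | nil => simp
  | cons cl cls ih =>
    rcases hp : cl.foldl pvBuild (m, n) with ⟨m1, n1⟩
    simp only [List.foldl_cons, hp] at hM ⊢
    have hext : DExt (cl.foldl pvBuild (m, n)).1 M := by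
      rw [hp]; exact dext_trans (dext_buildC cls (m1, n1)) hM
    have hin := inner_eq cl m n [] M hext
    rw [hp] at hin
    have hstepC : laStepClauza (m, n, accR) cl = (m1, n1, accR ++ [cl.map (pvEncode M)]) := by
      simp [laStepClauza, hin]
    rw [hstepC, ih m1 n1 _ hM]
    simp [List.map_cons]

-- ===== VERDICT (by name: the statement is the Claim_ definition above) =====
theorem la_clauze_int_spec : Claim_equal_la_clauze_int := by
  intro clauze _
  unfold Spec_la_clauze_int la_clauze_int la_clauze_int_alt
  rw [outer_eq clauze PySem.Dict.empty 1 [] _ (dext_refl _)]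
  simp
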